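-- pv_equiv track=rewrite | github.com/calebsandfort/the-macro-dashboard-v2 | macroDashboardMfr.py | get_next_nav_ticker
-- ===== SOURCE A (Python) =====
-- def get_next_nav_ticker(ticker_list, current_ticker):
--     if "Cash" in ticker_list:
--         ticker_list.remove('Cash')
--
--     next_ticker = ""
--     ticker_list_len = len(ticker_list)
--
--     for i in range(ticker_list_len):
--         t = ticker_list[i]
--
--         if (t == current_ticker) and (i == (ticker_list_len - 1)):
--             next_ticker = ticker_list[0]
--         elif (t == current_ticker):
--             next_ticker = ticker_list[i + 1]
--
--     return next_ticker
-- ===== SOURCE B (Python) =====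
-- def get_next_nav_ticker(ticker_list, current_ticker):
--     if "Cash" in ticker_list:
--         ticker_list.remove("Cash")
--     if current_ticker not in ticker_list:
--         return ""
--     idx = len(ticker_list) - 1 - ticker_list[::-1].index(current_ticker)
--     return ticker_list[(idx + 1) % len(ticker_list)]
-- ===== Notes on version B (the rewrite author's own statement) =====
-- stated objective: simpler
-- what changed: Replaces A's full index loop with per-element last-match/wraparound branches by a single rightmost-index lookup followed by one modular-arithmetic indexing step.
import Mathlib
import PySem

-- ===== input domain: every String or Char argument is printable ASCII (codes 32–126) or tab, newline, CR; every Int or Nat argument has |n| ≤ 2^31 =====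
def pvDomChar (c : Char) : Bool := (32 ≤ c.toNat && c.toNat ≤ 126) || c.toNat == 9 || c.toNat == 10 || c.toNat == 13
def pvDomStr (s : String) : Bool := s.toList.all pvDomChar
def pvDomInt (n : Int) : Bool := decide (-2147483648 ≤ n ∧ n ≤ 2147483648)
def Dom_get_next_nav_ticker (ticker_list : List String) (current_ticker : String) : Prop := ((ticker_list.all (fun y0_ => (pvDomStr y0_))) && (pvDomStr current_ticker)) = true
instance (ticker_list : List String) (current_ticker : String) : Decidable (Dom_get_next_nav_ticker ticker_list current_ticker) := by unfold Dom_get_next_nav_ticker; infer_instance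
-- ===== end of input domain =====

-- B replaces A's whole-list scan (last match wins) by one rightmost-index lookup plus a
-- modular wraparound index; objective: simpler. Both A and B remove the first 'Cash' from
-- the argument in place (same mutation); the equivalence proved is about the return value.

-- ===== PORT A =====
def get_next_nav_ticker (ticker_list : List String) (current_ticker : String) : String :=
  -- if "Cash" in ticker_list: ticker_list.remove('Cash')
  let l := if "Cash" ∈ ticker_list then (PySem.List.remove? ticker_list "Cash").getD ticker_list else ticker_list
  let n : Int := l.length
  -- for i in range(ticker_list_len): …  (pyGetD is safe: i is always in range here)
  (PySem.List.pyRange 0 n 1).foldl (fun next_ticker i =>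
    let t := PySem.List.pyGetD l i ""
    if t = current_ticker ∧ i = n - 1 then PySem.List.pyGetD l 0 ""
    else if t = current_ticker then PySem.List.pyGetD l (i + 1) ""
    else next_ticker) ""

-- ===== PORT B =====
def get_next_nav_ticker_alt (ticker_list : List String) (current_ticker : String) : String :=
  let l := if "Cash" ∈ ticker_list then (PySem.List.remove? ticker_list "Cash").getD ticker_list else ticker_list
  if current_ticker ∈ l then
    -- ticker_list[::-1].index(current_ticker)  (l[::-1] is l.reverse, PySem.List.slice?_none_none_neg_one)
    match PySem.List.index? l.reverse current_ticker with
    | some k =>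
        let idx : Int := (l.length : Int) - 1 - (k : Int)
        (PySem.List.pyGet? l (PySem.Int.mod (idx + 1) (l.length : Int))).getD ""
    | none => ""
  else ""

-- ===== PRECONDITION & SPEC =====
def Spec_get_next_nav_ticker (ticker_list : List String) (current_ticker : String) (out : String) : Prop := out = get_next_nav_ticker_alt ticker_list current_ticker
instance (ticker_list : List String) (current_ticker : String) (out : String) : Decidable (Spec_get_next_nav_ticker ticker_list current_ticker out) := by unfold Spec_get_next_nav_ticker; infer_instance

-- ===== CLAIM (what is proved, stated in full; the proofs are below) =====
def Claim_equal_get_next_nav_ticker : Prop := ∀ (ticker_list : List String) (current_ticker : String), Dom_get_next_nav_ticker ticker_list current_ticker → Spec_get_next_nav_ticker ticker_list current_ticker (get_next_nav_ticker ticker_list current_ticker)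

-- ===== LEMMAS AND PROOFS =====

-- A fold that overwrites its accumulator on every match returns the value of the LAST match.
theorem foldl_last_match {α : Type} (p : Int → Bool) (v : Int → α)
    (idxs : List Int) (acc : α) :
    idxs.foldl (fun a i => if p i then v i else a) acc
      = (idxs.reverse.find? p).elim acc v := by
  induction idxs generalizing acc with
  | nil => rfl
  | cons x xs ih =>
      simp only [List.foldl_cons, ih, List.reverse_cons, List.find?_append]
      cases h : xs.reverse.find? p with
      | some i => simp
      | none => by_cases hp : p x <;> simp [hp]

theorem find?_congr_mem {α : Type} (l : List α) (p q : α → Bool)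
    (h : ∀ a ∈ l, p a = q a) : l.find? p = l.find? q := by
  induction l with
  | nil => rfl
  | cons x xs ih =>
      simp only [List.find?_cons, h x (by simp)]
      cases q x
      · exact ih (fun a ha => h a (by simp [ha]))
      · rfl

theorem index?_eq_idxOf_of_mem (r : List String) (c : String) (h : c ∈ r) :
    PySem.List.index? r c = some (r.idxOf c) := by
  induction r with
  | nil => simp at h
  | cons x xs ih =>
      rw [PySem.List.index?_eq_idxOf?, List.idxOf?_cons]
      by_cases hx : x = c
      · subst hx; simp [List.idxOf_cons_self]
      · have hc : c ∈ xs := by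
          rcases List.mem_cons.mp h with h' | h'
          · exact absurd h'.symm hx
          · exact h'
        rw [← PySem.List.index?_eq_idxOf?, ih hc, List.idxOf_cons_ne _ hx]
        simp [hx]

-- Scanning indices from the right, the first index whose element equals c is
-- length - 1 - (index of c in the reversed list).
theorem find?_range_reverse_last (l : List String) (c : String) (h : c ∈ l) :
    (List.range l.length).reverse.find? (fun j => l.getD j "" == c)
      = some (l.length - 1 - l.reverse.idxOf c) := by
  induction l using List.reverseRecOn with
  | nil => simp at h
  | append_singleton xs x ih =>
      rw [List.length_append, List.length_singleton, List.range_succ, List.reverse_append]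
      simp only [List.reverse_singleton, List.singleton_append, List.find?_cons]
      have hget : (xs ++ [x]).getD xs.length "" = x := by
        simp [List.getD]
      rw [hget]
      by_cases hx : x = c
      · subst hx
        simp [List.reverse_append, List.idxOf_cons_self]
      · have hxc : (x == c) = false := by simp [hx]
        rw [hxc]
        have hc : c ∈ xs := by
          rcases List.mem_append.mp h with h' | h'
          · exact h'
          · simp at h'; exact absurd h'.symm hx
        have hcong : (List.range xs.length).reverse.find? (fun j => (xs ++ [x]).getD j "" == c)
            = (List.range xs.length).reverse.find? (fun j => xs.getD j "" == c) := by
          apply find?_congr_mem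
          intro j hj
          have hj' : j < xs.length := List.mem_range.mp (List.mem_reverse.mp hj)
          simp [List.getD, List.getElem?_append_left hj']
        rw [hcong, ih hc]
        have hidx : (xs ++ [x]).reverse.idxOf c = xs.reverse.idxOf c + 1 := by
          rw [List.reverse_append]
          simp [List.idxOf_cons_ne _ hx]
        have hlt : xs.reverse.idxOf c < xs.reverse.length :=
          List.idxOf_lt_length_of_mem (List.mem_reverse.mpr hc)
        rw [List.length_reverse] at hlt
        rw [hidx]
        have harith : xs.length + 1 - 1 - (xs.reverse.idxOf c + 1)
            = xs.length - 1 - xs.reverse.idxOf c := by omega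
        rw [harith]

-- Core: on any list (no Cash removal involved), A's loop equals B's lookup-and-mod formula.
theorem loop_eq_lookup (l : List String) (c : String) :
    (PySem.List.pyRange 0 (l.length : Int) 1).foldl (fun next_ticker i =>
        let t := PySem.List.pyGetD l i ""
        if t = c ∧ i = (l.length : Int) - 1 then PySem.List.pyGetD l 0 ""
        else if t = c then PySem.List.pyGetD l (i + 1) ""
        else next_ticker) ""
    = (if c ∈ l then
        match PySem.List.index? l.reverse c with
        | some k =>
            (PySem.List.pyGet? l (PySem.Int.mod (((l.length : Int) - 1 - (k : Int)) + 1) (l.length : Int))).getD ""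
        | none => ""
      else "") := by
  have hfold :
      (PySem.List.pyRange 0 (l.length : Int) 1).foldl (fun next_ticker i =>
        let t := PySem.List.pyGetD l i ""
        if t = c ∧ i = (l.length : Int) - 1 then PySem.List.pyGetD l 0 ""
        else if t = c then PySem.List.pyGetD l (i + 1) ""
        else next_ticker) ""
      = (((PySem.List.pyRange 0 (l.length : Int) 1).reverse.find?
            (fun i => PySem.List.pyGetD l i "" == c)).elim ""
          (fun i => if i = (l.length : Int) - 1 then PySem.List.pyGetD l 0 ""
                    else PySem.List.pyGetD l (i + 1) "")) := by
    rw [← foldl_last_match (fun i => PySem.List.pyGetD l i "" == c)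
          (fun i => if i = (l.length : Int) - 1 then PySem.List.pyGetD l 0 ""
                    else PySem.List.pyGetD l (i + 1) "")]
    apply PySem.List.foldl_congr_mem
    intro a i _
    by_cases h2 : i = (l.length : Int) - 1
    · subst h2
      by_cases h1 : PySem.List.pyGetD l ((l.length : Int) - 1) "" = c <;> simp [h1]
    · by_cases h1 : PySem.List.pyGetD l i "" = c <;> simp [h1, h2]
  rw [hfold, PySem.List.pyRange_zero_natCast, ← List.map_reverse, List.find?_map]
  by_cases hc : c ∈ l
  · -- last-occurrence case
    have hcrev : c ∈ l.reverse := List.mem_reverse.mpr hc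
    have hfind : (List.range l.length).reverse.find?
        ((fun i => PySem.List.pyGetD l i "" == c) ∘ (fun k : Nat => (k : Int)))
        = some (l.length - 1 - l.reverse.idxOf c) := by
      rw [← find?_range_reverse_last l c hc]
      apply find?_congr_mem
      intro j _
      simp [Function.comp, PySem.List.pyGetD_natCast]
    rw [if_pos hc, index?_eq_idxOf_of_mem l.reverse c hcrev, hfind]
    set k := l.reverse.idxOf c with hk
    have hklt : k < l.length := by
      have := List.idxOf_lt_length_of_mem hcrev
      rwa [List.length_reverse] at this
    have hlen : 0 < l.length := Nat.lt_of_le_of_lt (Nat.zero_le _) hklt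
    simp only [Option.map_some, Option.elim_some]
    by_cases h0 : k = 0
    · -- the LAST element matches: wrap to l[0]
      rw [h0]
      have h1 : ((l.length - 1 - 0 : Nat) : Int) = (l.length : Int) - 1 := by
        omega
      rw [h1, if_pos rfl]
      have hmod : PySem.Int.mod (((l.length : Int) - 1 - ((0 : Nat) : Int)) + 1) (l.length : Int) = 0 := by
        have h2 : ((l.length : Int) - 1 - ((0 : Nat) : Int)) + 1 = ((l.length : Nat) : Int) := by
          push_cast; ring
        rw [h2, PySem.Int.mod_natCast]
        simp
      rw [hmod]
      cases l with
      | nil => simp at hlen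
      | cons y ys => simp [PySem.List.pyGetD_zero_cons]
    · -- an interior element is the last match: its successor
      have hne : ((l.length - 1 - k : Nat) : Int) ≠ (l.length : Int) - 1 := by
        push_cast [Nat.sub_sub]
        omega
      rw [if_neg hne]
      have hlt : l.length - k < l.length := by omega
      have h2 : ((l.length - 1 - k : Nat) : Int) + 1 = ((l.length - k : Nat) : Int) := by
        push_cast [Nat.sub_sub]; omega
      have hmod : PySem.Int.mod (((l.length : Int) - 1 - ((k : Nat) : Int)) + 1) (l.length : Int)
          = ((l.length - k : Nat) : Int) := by
        have h1 : ((l.length : Int) - 1 - ((k : Nat) : Int)) + 1 = ((l.length - k : Nat) : Int) := by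
          omega
        rw [h1, PySem.Int.mod_natCast]
        congr 1
        exact Nat.mod_eq_of_lt hlt
      rw [hmod, h2, PySem.List.pyGet?_natCast, PySem.List.pyGetD_natCast,
          List.getElem?_eq_getElem hlt, List.getD_eq_getElem?_getD,
          List.getElem?_eq_getElem hlt]
  · -- no occurrence: the loop never fires and both sides return ""
    rw [if_neg hc]
    have hnone : (List.range l.length).reverse.find?
        ((fun i => PySem.List.pyGetD l i "" == c) ∘ (fun k : Nat => (k : Int))) = none := by
      rw [List.find?_eq_none]
      intro j hj
      have hj' : j < l.length := List.mem_range.mp (List.mem_reverse.mp hj)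
      intro hEq
      apply hc
      have hEq' : l.getD j "" = c := by
        simpa [Function.comp, PySem.List.pyGetD_natCast] using hEq
      rw [← hEq', List.getD_eq_getElem?_getD, List.getElem?_eq_getElem hj']
      exact List.getElem_mem hj'
    rw [hnone]
    rfl

-- ===== VERDICT (by name: the statement is the Claim_ definition above) =====
theorem get_next_nav_ticker_spec : Claim_equal_get_next_nav_ticker := by
  intro ticker_list current_ticker _
  unfold Spec_get_next_nav_ticker get_next_nav_ticker get_next_nav_ticker_alt
  exact loop_eq_lookup _ current_ticker
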